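-- pv_equiv track=rewrite | github.com/k-ms1998/programmers_practice | hash/no2.py | solution
-- ===== SOURCE A (Python) =====
-- def solution(phone_book):
--     answer = True
--
--     hash = {}
--     for p in phone_book:
--         if p[0] in hash:
--             hash[p[0]].append(p)
--         else:
--             hash[p[0]] = [p]
--
--     for h in hash:
--         if len(hash[h]) > 1:
--             for i in range(len(hash[h])):
--                 for j in range(len(hash[h])):
--                     if i != j and (hash[h][j].startswith(hash[h][i]) or hash[h][i].startswith(hash[h][j])):
--                         return False
--
--
--     return answer
-- ===== SOURCE B (Python) =====
-- def solution(phone_book):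
--     s = sorted(phone_book)
--     return all(not b.startswith(a) for a, b in zip(s, s[1:]))
-- ===== Notes on version B (the rewrite author's own statement) =====
-- stated objective: alternative
-- what changed: Replaces the first-character hash grouping with quadratic all-pairs startswith scans inside each group by a single lexicographic sort followed by one startswith check per adjacent pair (worst-case O(n log n * L) instead of O(n^2 * L); measured only ~1.4x on the timing inputs, so not claimed as faster).
-- crash fix: On any list containing the empty string A raises IndexError at p[0]; B returns the sorted-adjacent answer there (e.g. False on ['', '12']). — e.g. on solution(["", "12"]): A raises IndexError, B returns false
import Mathlib
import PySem

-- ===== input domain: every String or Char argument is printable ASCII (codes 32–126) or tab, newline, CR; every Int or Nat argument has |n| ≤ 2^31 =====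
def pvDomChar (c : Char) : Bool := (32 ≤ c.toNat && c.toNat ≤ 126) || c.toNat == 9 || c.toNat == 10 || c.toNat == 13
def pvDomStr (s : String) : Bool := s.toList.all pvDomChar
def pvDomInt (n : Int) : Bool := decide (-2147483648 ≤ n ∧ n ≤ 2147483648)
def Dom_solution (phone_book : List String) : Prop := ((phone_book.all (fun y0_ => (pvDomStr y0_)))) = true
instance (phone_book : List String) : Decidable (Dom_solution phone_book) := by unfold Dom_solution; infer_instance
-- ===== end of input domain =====

-- B replaces A's first-char hash grouping with all-pairs startswith scans by a lexicographic sort plus one startswith check per adjacent pair.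


-- ===== PORT A =====
-- p[0]: under Pre_solution every string is nonempty, so the getD default is never read
def pvHd0 (p : String) : Char := (PySem.Str.pyGet? p 0).getD ' '

-- the inner "for i …: for j …: if i != j and (…startswith… or …startswith…): return False" loops
def pvGroupBad (g : List String) : Bool :=
  (PySem.List.pyRange 0 g.length 1).any fun i =>
    (PySem.List.pyRange 0 g.length 1).any fun j =>
      decide (i ≠ j) &&
        (PySem.Str.startswith (PySem.List.pyGetD g j "") (PySem.List.pyGetD g i "") ||
         PySem.Str.startswith (PySem.List.pyGetD g i "") (PySem.List.pyGetD g j ""))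

def solution (phone_book : List String) : Bool :=
  -- "hash[p[0]].append(p)" / "hash[p[0]] = [p]" : insertion-ordered dict keyed by the first character
  let d := phone_book.foldl (fun d p => d.modify (pvHd0 p) [] (· ++ [p])) PySem.Dict.empty
  -- "for h in hash: if len(hash[h]) > 1: … return False"; falling through returns answer = True
  if d.keys.any (fun h => decide (1 < (d.getD h []).length) && pvGroupBad (d.getD h [])) then false
  else true

-- ===== PORT B =====
-- Python str "<" is code-point lexicographic = "<" on s.toList (PYSEM), hence the sort key
def solution_alt (phone_book : List String) : Bool :=
  let s := PySem.List.sorted phone_book (fun x => x.toList) false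
  (s.zip (PySem.List.slice s (some 1) none)).all fun ab => !(PySem.Str.startswith ab.2 ab.1)

-- ===== PRECONDITION & SPEC =====
-- Pre_ excludes lists containing "": there Python A raises IndexError at p[0].
def Pre_solution (phone_book : List String) : Prop := "" ∉ phone_book
instance (phone_book : List String) : Decidable (Pre_solution phone_book) := by unfold Pre_solution; infer_instance
def pvWitness_solution : List String := (["119", "97674223", "1195524421"])

-- On any list containing the empty string A raises IndexError at p[0]; B returns the sorted-adjacent answer there.
def Raises_solution (phone_book : List String) : Prop := "" ∈ phone_book
instance (phone_book : List String) : Decidable (Raises_solution phone_book) := by unfold Raises_solution; infer_instance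
def pvRaiseWitness_solution : List String := (["", "12"])
def pvRaiseWitnessOut_solution : Bool := false

def Spec_solution (phone_book : List String) (out : Bool) : Prop := out = solution_alt phone_book
instance (phone_book : List String) (out : Bool) : Decidable (Spec_solution phone_book out) := by unfold Spec_solution; infer_instance

-- ===== CLAIM (what is proved, stated in full; the proofs are below) =====
def Claim_equal_solution : Prop := ∀ (phone_book : List String), Dom_solution phone_book → Pre_solution phone_book → Spec_solution phone_book (solution phone_book)
def Claim_raises_solution : Prop := (∀ (phone_book : List String), Dom_solution phone_book → Raises_solution phone_book → ¬ Pre_solution phone_book) ∧ (Dom_solution (pvRaiseWitness_solution) ∧ Raises_solution (pvRaiseWitness_solution) ∧ solution_alt (pvRaiseWitness_solution) = pvRaiseWitnessOut_solution)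

-- ===== LEMMAS AND PROOFS =====
-- Both programs return False exactly when two distinct occurrences in the list are prefix-related (pvBad);
-- A is reduced to pvBad through its first-character groups, B through the sorted order (a prefix pair
-- forces an adjacent prefix pair in the sorted list).

theorem cons_le_cons_iff' (a c : Char) (x z : List Char) (h : (a::x) ≤ (c::z)) : a < c ∨ (a = c ∧ x ≤ z) := by
  rcases lt_or_eq_of_le h with hlt | heq
  · have hlex := (List.lt_iff_lex_lt (a::x) (c::z)).mp hlt
    cases hlex with
    | rel h => exact Or.inl h
    | cons h => exact Or.inr ⟨rfl, le_of_lt ((List.lt_iff_lex_lt _ _).mpr h)⟩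
  · cases heq; exact Or.inr ⟨rfl, le_refl _⟩

theorem prefix_le' (x y : List Char) (h : x <+: y) : x ≤ y := by
  induction x generalizing y with
  | nil =>
    rcases y with _ | ⟨b, ys⟩
    · exact le_refl _
    · exact le_of_lt ((List.lt_iff_lex_lt _ _).mpr List.Lex.nil)
  | cons a xs ih =>
    rcases y with _ | ⟨b, ys⟩
    · simpa using h.length_le
    · rw [List.cons_prefix_cons] at h
      obtain ⟨rfl, h2⟩ := h
      rcases lt_or_eq_of_le (ih ys h2) with hlt | heq
      · exact le_of_lt ((List.lt_iff_lex_lt _ _).mpr (List.Lex.cons ((List.lt_iff_lex_lt _ _).mp hlt)))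
      · cases heq; exact le_refl _

theorem between_prefix (x z y : List Char) (hxz : x ≤ z) (hzy : z ≤ y) (hp : x <+: y) : x <+: z := by
  induction x generalizing z y with
  | nil => exact List.nil_prefix
  | cons a xs ih =>
    rcases y with _ | ⟨b, ys⟩
    · simpa using hp.length_le
    · rw [List.cons_prefix_cons] at hp
      obtain ⟨rfl, hp2⟩ := hp
      rcases z with _ | ⟨c, zs⟩
      · exact absurd hxz (of_decide_eq_false rfl)
      · rcases cons_le_cons_iff' a c xs zs hxz with hac | ⟨rfl, hxz2⟩
        · rcases cons_le_cons_iff' c a zs ys hzy with hca | ⟨rfl, _⟩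
          · exact absurd hac (asymm hca)
          · exact absurd hac (lt_irrefl _)
        · rcases cons_le_cons_iff' a a zs ys hzy with hca | ⟨_, hzy2⟩
          · exact absurd hca (lt_irrefl _)
          · exact List.cons_prefix_cons.mpr ⟨rfl, ih zs ys hxz2 hzy2 hp2⟩

def pvRel (x y : String) : Prop := x.toList <+: y.toList ∨ y.toList <+: x.toList

def pvBad (l : List String) : Prop :=
  (∃ x ∈ l, ∃ y ∈ l, x ≠ y ∧ pvRel x y) ∨ ¬ l.Nodup

def pvIdxBad (l : List String) : Prop :=
  ∃ (i j : Nat) (hi : i < l.length) (hj : j < l.length), i ≠ j ∧ pvRel l[i] l[j]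

theorem pvRel_symm {x y : String} (h : pvRel x y) : pvRel y x := h.symm

theorem pvRel_refl (x : String) : pvRel x x := Or.inl (List.prefix_refl _)

theorem not_nodup_iff_idx (l : List String) :
    ¬ l.Nodup ↔ ∃ (i j : Nat) (_ : i < j) (hj : j < l.length), l[i] = l[j] := by
  rw [List.nodup_iff_getElem?_ne_getElem?]
  push Not
  constructor
  · rintro ⟨i, j, hij, hj, h⟩
    have hi : i < l.length := lt_trans hij hj
    refine ⟨i, j, hij, hj, ?_⟩
    rw [List.getElem?_eq_getElem hi, List.getElem?_eq_getElem hj] at h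
    exact Option.some_injective _ h
  · rintro ⟨i, j, hij, hj, h⟩
    have hi : i < l.length := lt_trans hij hj
    exact ⟨i, j, hij, hj, by rw [List.getElem?_eq_getElem hi, List.getElem?_eq_getElem hj, h]⟩

theorem pvIdxBad_iff_pvBad (l : List String) : pvIdxBad l ↔ pvBad l := by
  constructor
  · rintro ⟨i, j, hi, hj, hij, hrel⟩
    by_cases heq : l[i] = l[j]
    · exact Or.inr (fun hnd => hij (hnd.getElem_inj_iff.mp heq))
    · exact Or.inl ⟨l[i], List.getElem_mem hi, l[j], List.getElem_mem hj, heq, hrel⟩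
  · rintro (⟨x, hx, y, hy, hne, hrel⟩ | hnd)
    · obtain ⟨i, hi, rfl⟩ := List.mem_iff_getElem.mp hx
      obtain ⟨j, hj, rfl⟩ := List.mem_iff_getElem.mp hy
      exact ⟨i, j, hi, hj, fun h => hne (by subst h; rfl), hrel⟩
    · obtain ⟨i, j, hij, hj, heq⟩ := (not_nodup_iff_idx l).mp hnd
      exact ⟨i, j, lt_trans hij hj, hj, Nat.ne_of_lt hij, heq ▸ pvRel_refl _⟩

theorem pvBad_perm {l l' : List String} (h : l.Perm l') : pvBad l ↔ pvBad l' := by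
  unfold pvBad
  constructor
  · rintro (⟨x, hx, y, hy, hne, hrel⟩ | hnd)
    · exact Or.inl ⟨x, h.mem_iff.mp hx, y, h.mem_iff.mp hy, hne, hrel⟩
    · exact Or.inr (fun hn => hnd (h.nodup_iff.mpr hn))
  · rintro (⟨x, hx, y, hy, hne, hrel⟩ | hnd)
    · exact Or.inl ⟨x, h.mem_iff.mpr hx, y, h.mem_iff.mpr hy, hne, hrel⟩
    · exact Or.inr (fun hn => hnd (h.nodup_iff.mp hn))


theorem adj_of_idxBad (s : List String)
    (hmono : ∀ (p q : Nat) (hp : p < s.length) (hq : q < s.length), p ≤ q → s[p].toList ≤ s[q].toList) :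
    pvIdxBad s ↔ ∃ (k : Nat) (h : k + 1 < s.length), s[k].toList <+: s[k+1].toList := by
  constructor
  · rintro ⟨i, j, hi, hj, hij, hrel⟩
    have key : ∀ (p q : Nat) (hp : p < s.length) (hq : q < s.length), p < q →
        pvRel s[p] s[q] → ∃ (k : Nat) (h : k + 1 < s.length), s[k].toList <+: s[k+1].toList := by
      intro p q hp hq hpq hrel
      have hle : s[p].toList ≤ s[q].toList := hmono p q hp hq (le_of_lt hpq)
      have hpre : s[p].toList <+: s[q].toList := by
        rcases hrel with h | h
        · exact h
        · have h2 : s[q].toList ≤ s[p].toList := prefix_le' _ _ h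
          have heq : s[q].toList = s[p].toList := le_antisymm h2 hle
          rw [heq]
      have hq1 : p + 1 < s.length := lt_of_le_of_lt hpq hq
      have h1 : s[p].toList ≤ s[p+1].toList := hmono p (p+1) hp hq1 (Nat.le_succ p)
      have h2 : s[p+1].toList ≤ s[q].toList := hmono (p+1) q hq1 hq (Nat.succ_le_of_lt hpq)
      exact ⟨p, hq1, between_prefix _ _ _ h1 h2 hpre⟩
    rcases Nat.lt_trichotomy i j with hlt | heq | hgt
    · exact key i j hi hj hlt hrel
    · exact absurd heq hij
    · exact key j i hj hi hgt (pvRel_symm hrel)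
  · rintro ⟨k, hk, hpre⟩
    exact ⟨k, k+1, lt_trans (Nat.lt_succ_self k) hk, hk, Nat.ne_of_lt (Nat.lt_succ_self k), Or.inl hpre⟩

theorem solution_alt_eq (pb : List String) :
    solution_alt pb =
      ((PySem.List.sorted pb (fun x => x.toList) false).zip
        (PySem.List.slice (PySem.List.sorted pb (fun x => x.toList) false) (some 1) none)).all
        (fun ab => !(PySem.Str.startswith ab.2 ab.1)) := rfl

theorem all_zip_false (s : List String) :
    ((s.zip (PySem.List.slice s (some 1) none)).all
        (fun ab => !(PySem.Str.startswith ab.2 ab.1)) = false) ↔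
    ∃ (k : Nat) (h : k + 1 < s.length), s[k].toList <+: s[k+1].toList := by
  rw [PySem.List.slice_from_one, List.all_eq_false]
  constructor
  · rintro ⟨ab, hmem, hb⟩
    obtain ⟨k, hk, hab⟩ := List.mem_iff_getElem.mp hmem
    have hklen : k + 1 < s.length := by
      have := hk
      simp only [List.length_zip, List.length_tail] at this
      omega
    refine ⟨k, hklen, ?_⟩
    have habv : ab = (s[k], s[k+1]) := by
      rw [← hab, List.getElem_zip]
      congr 1
      rw [List.getElem_tail]
    subst habv
    simpa [PySem.Chars.startswith_iff] using hb
  · rintro ⟨k, hk, hpre⟩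
    refine ⟨(s[k], s[k+1]), ?_, ?_⟩
    · rw [List.mem_iff_getElem]
      have hkz : k < (s.zip s.tail).length := by
        simp only [List.length_zip, List.length_tail]; omega
      refine ⟨k, hkz, ?_⟩
      rw [List.getElem_zip]
      congr 1
      rw [List.getElem_tail]
    · simpa [PySem.Chars.startswith_iff] using hpre

theorem sorted_bridge (pb : List String) :
    PySem.List.sorted pb (fun x => x.toList) false =
    @PySem.List.sorted String (List Char) List.instLinearOrder.toLT LinearOrder.toDecidableLT
      pb (fun x => x.toList) false := by
  rw [PySem.List.sorted_eq_foldl_insertBy,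
      @PySem.List.sorted_eq_foldl_insertBy String (List Char) List.instLinearOrder.toLT
        LinearOrder.toDecidableLT pb (fun x => x.toList)]
  have hf : (fun (a b : String) => decide (a.toList < b.toList)) =
      (fun (a b : String) =>
        @decide (@LT.lt (List Char) List.instLinearOrder.toLT a.toList b.toList)
          (LinearOrder.toDecidableLT a.toList b.toList)) := by
    funext a b
    exact decide_eq_decide.mpr (List.lt_iff_lex_lt a.toList b.toList)
  rw [hf]

theorem solution_alt_false_iff (pb : List String) : solution_alt pb = false ↔ pvBad pb := by
  rw [solution_alt_eq, sorted_bridge, all_zip_false]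
  exact Iff.trans
    (adj_of_idxBad _ (fun p q _ hq hpq =>
      PySem.List.key_sorted_getElem_mono (xs := pb) (key := fun x => x.toList) hpq hq)).symm
    (Iff.trans (pvIdxBad_iff_pvBad _)
      (pvBad_perm (@PySem.List.sorted_perm String (List Char) List.instLinearOrder.toLT
        LinearOrder.toDecidableLT pb (fun x => x.toList) false)))

-- ========= A side =========
theorem hd0_head (x : String) (c : Char) (cs : List Char) (hx : x.toList = c :: cs) :
    pvHd0 x = c := by
  unfold pvHd0
  rw [PySem.Str.pyGet?_eq, PySem.Chars.pyGet?_eq_listPyGet?, hx]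
  simp [PySem.List.pyGet?, PySem.List.pyIdx?]

theorem toList_ne_nil (x : String) (hx : x ≠ "") : ∃ c cs, x.toList = c :: cs := by
  cases h : x.toList with
  | nil =>
    exfalso
    apply hx
    have := congrArg String.ofList h
    simpa using this
  | cons c cs => exact ⟨c, cs, rfl⟩

theorem rel_hd0_eq (x y : String) (hx : x ≠ "") (hy : y ≠ "") (h : pvRel x y) :
    pvHd0 x = pvHd0 y := by
  obtain ⟨c, cs, hc⟩ := toList_ne_nil x hx
  obtain ⟨c', cs', hc'⟩ := toList_ne_nil y hy
  rw [hd0_head x c cs hc, hd0_head y c' cs' hc']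
  rcases h with h | h
  · rw [hc, hc'] at h
    exact (List.cons_prefix_cons.mp h).1
  · rw [hc, hc'] at h
    exact ((List.cons_prefix_cons.mp h).1).symm

theorem groupBad_iff (g : List String) :
    (decide (1 < g.length) && pvGroupBad g) = true ↔ pvIdxBad g := by
  unfold pvGroupBad
  rw [Bool.and_eq_true, decide_eq_true_iff]
  constructor
  · rintro ⟨-, hany⟩
    rw [List.any_eq_true] at hany
    obtain ⟨i, hi, hany2⟩ := hany
    rw [List.any_eq_true] at hany2
    obtain ⟨j, hj, hcond⟩ := hany2
    rw [PySem.List.mem_pyRange_one] at hi hj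
    rw [Bool.and_eq_true, decide_eq_true_iff] at hcond
    obtain ⟨hne, hsw⟩ := hcond
    rw [PySem.List.pyGetD_eq_getElem g "" hi.1 hi.2, PySem.List.pyGetD_eq_getElem g "" hj.1 hj.2] at hsw
    have hi' : i.toNat < g.length := by omega
    have hj' : j.toNat < g.length := by omega
    refine ⟨i.toNat, j.toNat, hi', hj', by omega, ?_⟩
    rw [Bool.or_eq_true] at hsw
    rcases hsw with h | h
    · exact Or.inl (by
        rw [PySem.Str.startswith_eq] at h
        exact (PySem.Chars.startswith_iff _ _).mp h)
    · exact Or.inr (by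
        rw [PySem.Str.startswith_eq] at h
        exact (PySem.Chars.startswith_iff _ _).mp h)
  · rintro ⟨i, j, hi, hj, hij, hrel⟩
    refine ⟨by omega, ?_⟩
    rw [List.any_eq_true]
    refine ⟨(i : Int), PySem.List.mem_pyRange_one.mpr (by omega), ?_⟩
    rw [List.any_eq_true]
    refine ⟨(j : Int), PySem.List.mem_pyRange_one.mpr (by omega), ?_⟩
    rw [Bool.and_eq_true, decide_eq_true_iff]
    refine ⟨by omega, ?_⟩
    rw [PySem.List.pyGetD_eq_getElem g (i := (j : Int)) "" (by omega) (by exact_mod_cast hj),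
        PySem.List.pyGetD_eq_getElem g (i := (i : Int)) "" (by omega) (by exact_mod_cast hi)]
    rw [Bool.or_eq_true]
    simp only [Int.toNat_natCast]
    rcases hrel with h | h
    · exact Or.inl (by rw [PySem.Str.startswith_eq]; exact (PySem.Chars.startswith_iff _ _).mpr h)
    · exact Or.inr (by rw [PySem.Str.startswith_eq]; exact (PySem.Chars.startswith_iff _ _).mpr h)

theorem dict_getD (pb : List String) (c : Char) :
    ((pb.foldl (fun d p => d.modify (pvHd0 p) [] (· ++ [p])) PySem.Dict.empty).getD c []) =
      pb.filter (fun p => pvHd0 p == c) := by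
  have h1 : (pb.foldl (fun d p => d.modify (pvHd0 p) [] (· ++ [p])) PySem.Dict.empty) =
      ((pb.map (fun p => (pvHd0 p, p))).foldl
        (fun d q => d.modify q.1 [] (· ++ [q.2])) PySem.Dict.empty) := by
    rw [List.foldl_map]
  rw [h1, PySem.Dict.getD_foldl_modify_append]
  rw [List.filter_map]
  simp [List.map_map, Function.comp_def]

theorem dict_keys (pb : List String) :
    ((pb.foldl (fun d p => d.modify (pvHd0 p) [] (· ++ [p])) PySem.Dict.empty).keys) =
      PySem.Set.ofList (pb.map pvHd0) := by
  have h := PySem.Dict.keys_foldl_modify_key pb pvHd0 ([] : List String)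
    (fun _ x => (· ++ [x])) PySem.Dict.empty
  simpa [PySem.Set.update, PySem.Set.ofList_eq_foldl] using h

theorem solution_false_iff (pb : List String) (hne : "" ∉ pb) :
    solution pb = false ↔ pvBad pb := by
  unfold solution
  simp only [dict_getD, dict_keys]
  rw [show ∀ (b : Bool), ((if b then false else true) = false ↔ b = true) from fun b => by cases b <;> simp]
  rw [List.any_eq_true]
  constructor
  · rintro ⟨k, hk, hcond⟩
    have hidx := (groupBad_iff _).mp hcond
    rw [pvIdxBad_iff_pvBad] at hidx
    rcases hidx with ⟨x, hx, y, hy, hxy, hrel⟩ | hnd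
    · exact Or.inl ⟨x, (List.mem_filter.mp hx).1, y, (List.mem_filter.mp hy).1, hxy, hrel⟩
    · exact Or.inr (fun hn => hnd (hn.filter _))
  · intro hbad
    rcases hbad with ⟨x, hx, y, hy, hxy, hrel⟩ | hnd
    · have hx0 : x ≠ "" := fun h => hne (h ▸ hx)
      have hy0 : y ≠ "" := fun h => hne (h ▸ hy)
      have hh := rel_hd0_eq x y hx0 hy0 hrel
      refine ⟨pvHd0 x, ?_, ?_⟩
      · rw [PySem.Set.mem_ofList]
        exact List.mem_map.mpr ⟨x, hx, rfl⟩
      · rw [groupBad_iff, pvIdxBad_iff_pvBad]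
        refine Or.inl ⟨x, ?_, y, ?_, hxy, hrel⟩
        · exact List.mem_filter.mpr ⟨hx, by simp⟩
        · exact List.mem_filter.mpr ⟨hy, by simp [hh]⟩
    · obtain ⟨x, hdup⟩ := List.exists_duplicate_iff_not_nodup.mpr hnd
      have hxmem : x ∈ pb := hdup.mem
      have hcount : 2 ≤ pb.count x := List.duplicate_iff_two_le_count.mp hdup
      refine ⟨pvHd0 x, ?_, ?_⟩
      · rw [PySem.Set.mem_ofList]
        exact List.mem_map.mpr ⟨x, hxmem, rfl⟩
      · rw [groupBad_iff, pvIdxBad_iff_pvBad]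
        refine Or.inr ?_
        rw [List.nodup_iff_count_le_one]
        push Not
        refine ⟨x, ?_⟩
        rw [List.count_filter (by simp)]
        omega

-- ===== VERDICT (by name: the statement is the Claim_ definition above) =====
theorem solution_spec : Claim_equal_solution := by
  intro pb _ hpre
  unfold Spec_solution
  have hA := solution_false_iff pb hpre
  have hB := solution_alt_false_iff pb
  cases ha : solution pb <;> cases hb : solution_alt pb <;> simp_all

@[simp] theorem solution_raises : Claim_raises_solution := by
  unfold Claim_raises_solution
  exact ⟨fun pb _ hr hp => hp hr, by decide⟩
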